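-- pv_equiv track=rewrite | github.com/wellheard/wellheard-ai | src/call_scheduler.py | get_warmup_sequence
-- ===== SOURCE A (Python) =====
-- from typing import Optional, List, Dict, Tuple
--
-- def get_warmup_sequence(campaign_size: int) -> List[int]:
--     """
--     Calculate call volume ramp-up sequence for new campaign.
--
--     Respects 50-75 calls/number/day and new number warming:
--     - Day 1-7: 15 calls/day
--     - Day 8-14: 30 calls/day
--     - Day 15-21: 50 calls/day
--     - Day 22+: 75 calls/day
--
--     Args:
--         campaign_size: Total prospects to call
--
--     Returns:
--         List of daily call targets
--     """
--     sequence = []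
--     day = 1
--     daily_limit = 15
--
--     remaining = campaign_size
--     while remaining > 0:
--         calls_today = min(daily_limit, remaining)
--         sequence.append(calls_today)
--         remaining -= calls_today
--
--         # Ramp up schedule
--         if day == 7:
--             daily_limit = 30
--         elif day == 14:
--             daily_limit = 50
--         elif day == 21:
--             daily_limit = 75
--
--         day += 1
--
--     return sequence
-- ===== SOURCE B (Python) =====
-- def get_warmup_sequence(campaign_size):
--     seq = []
--     remaining = campaign_size
--     for limit, days in ((15, 7), (30, 7), (50, 7)):
--         if remaining <= 0:
--             break
--         full = min(days, remaining // limit)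
--         seq += [limit] * full
--         remaining -= full * limit
--         if 0 < remaining and full < days:
--             seq.append(remaining)
--             remaining = 0
--     if remaining > 0:
--         q, r = divmod(remaining, 75)
--         seq += [75] * q
--         if r:
--             seq.append(r)
--     return seq
-- ===== Notes on version B (the rewrite author's own statement) =====
-- stated objective: alternative
-- what changed: Replaced the day-by-day simulation loop with a tier table processed arithmetically: each bounded tier emits its full days at once by integer division plus at most one partial day, and the final unbounded tier is handled with divmod.
import Mathlib
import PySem

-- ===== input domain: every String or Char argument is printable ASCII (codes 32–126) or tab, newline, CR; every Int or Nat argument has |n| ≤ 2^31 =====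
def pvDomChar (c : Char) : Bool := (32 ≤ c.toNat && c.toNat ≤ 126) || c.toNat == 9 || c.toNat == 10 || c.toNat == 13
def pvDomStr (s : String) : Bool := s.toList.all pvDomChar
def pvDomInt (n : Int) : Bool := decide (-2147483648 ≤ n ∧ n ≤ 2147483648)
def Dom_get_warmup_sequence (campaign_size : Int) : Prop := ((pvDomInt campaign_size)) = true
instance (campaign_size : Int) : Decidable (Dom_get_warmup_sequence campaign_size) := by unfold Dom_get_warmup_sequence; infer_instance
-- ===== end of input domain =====

-- B replaces A's day-by-day simulation loop by a tier table processed arithmetically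
-- (full days per bounded tier by integer division plus at most one partial day,
-- divmod for the final unbounded tier).

-- ===== PORT A =====
-- ramp-up schedule update at the end of each day (A's if/elif chain)
def pvNextLimit (day daily_limit : Int) : Int :=
  if day = 7 then 30 else if day = 14 then 50 else if day = 21 then 75 else daily_limit

-- A's while loop; the `0 < daily_limit` conjunct only makes the recursion total
-- (it always holds on A's reachable states, where daily_limit ∈ {15,30,50,75}).
def pvLoopA (remaining day daily_limit : Int) : List Int :=
  if h : 0 < daily_limit ∧ 0 < remaining then
    min daily_limit remaining ::
      pvLoopA (remaining - min daily_limit remaining) (day + 1) (pvNextLimit day daily_limit)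
  else []
termination_by remaining.toNat
decreasing_by
  have h1 : 1 ≤ min daily_limit remaining := le_min h.1 h.2
  omega

def get_warmup_sequence (campaign_size : Int) : List Int :=
  pvLoopA campaign_size 1 15

-- ===== PORT B =====
-- one bounded tier (limit, days) of Source B's for-loop; `st.2 ≤ 0` mirrors the break
def pvTierStep (st : List Int × Int) (t : Int × Int) : List Int × Int :=
  if st.2 ≤ 0 then st
  else
    let full := min t.2 (PySem.Int.floordiv st.2 t.1)
    let seq := st.1 ++ List.replicate full.toNat t.1
    let rem := st.2 - full * t.1
    if 0 < rem ∧ full < t.2 then (seq ++ [rem], 0) else (seq, rem)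

-- Source B's final unbounded-tier block (divmod) on the fold's final state
def pvFinish (st : List Int × Int) : List Int :=
  if 0 < st.2 then
    st.1 ++ List.replicate ((PySem.Int.floordiv st.2 75).toNat) 75 ++
      (if PySem.Int.mod st.2 75 ≠ 0 then [PySem.Int.mod st.2 75] else [])
  else st.1

def get_warmup_sequence_alt (campaign_size : Int) : List Int :=
  pvFinish ([((15 : Int), (7 : Int)), (30, 7), (50, 7)].foldl pvTierStep ([], campaign_size))

-- ===== PRECONDITION & SPEC =====
def Spec_get_warmup_sequence (campaign_size : Int) (out : List Int) : Prop := out = get_warmup_sequence_alt campaign_size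
instance (campaign_size : Int) (out : List Int) : Decidable (Spec_get_warmup_sequence campaign_size out) := by unfold Spec_get_warmup_sequence; infer_instance

-- ===== CLAIM (what is proved, stated in full; the proofs are below) =====
def Claim_equal_get_warmup_sequence : Prop := ∀ (campaign_size : Int), Dom_get_warmup_sequence campaign_size → Spec_get_warmup_sequence campaign_size (get_warmup_sequence campaign_size)

-- ===== LEMMAS AND PROOFS =====

-- what both programs emit when `r` prospects are finished off at constant limit `L`
def pvClose (r L : Int) : List Int :=
  List.replicate ((PySem.Int.floordiv r L).toNat) L ++
    (if PySem.Int.mod r L ≠ 0 then [PySem.Int.mod r L] else [])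

lemma pvClose_small {r L : Int} (hL : 0 < L) (h0 : 0 < r) (h : r < L) : pvClose r L = [r] := by
  unfold pvClose
  rw [PySem.Int.floordiv_eq_ediv_of_pos hL, PySem.Int.mod_eq_emod_of_pos hL]
  rw [Int.ediv_eq_zero_of_lt (by omega) h, Int.emod_eq_of_lt (by omega) h]
  simp
  omega

lemma pvClose_exact {L : Int} (hL : 0 < L) : pvClose L L = [L] := by
  unfold pvClose
  rw [PySem.Int.floordiv_eq_ediv_of_pos hL, PySem.Int.mod_eq_emod_of_pos hL]
  rw [Int.ediv_self (by omega), Int.emod_self]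
  simp

lemma pvClose_step {r L : Int} (hL : 0 < L) (h : L < r) : pvClose r L = L :: pvClose (r - L) L := by
  unfold pvClose
  rw [PySem.Int.floordiv_eq_ediv_of_pos hL, PySem.Int.mod_eq_emod_of_pos hL,
      PySem.Int.floordiv_eq_ediv_of_pos hL, PySem.Int.mod_eq_emod_of_pos hL]
  have hq1 : 1 ≤ r / L := by
    rw [Int.le_ediv_iff_mul_le hL]; omega
  have hdiv : (r - L) / L = r / L - 1 := by
    have : r - L = r + (-1) * L := by ring
    rw [this, Int.add_mul_ediv_right _ _ (by omega)]; ring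
  have hmod : (r - L) % L = r % L := Int.sub_emod_right r L
  rw [hdiv, hmod]
  have ht : (r / L).toNat = ((r / L - 1).toNat) + 1 := by omega
  rw [ht, List.replicate_succ]
  simp

lemma pvTierStep_neg {st : List Int × Int} {t : Int × Int} (h : st.2 ≤ 0) :
    pvTierStep st t = st := by
  unfold pvTierStep; simp [h]

lemma pvTierStep_pos (seq : List Int) (r L D : Int) (hr : 0 < r) (hL : 0 < L) :
    pvTierStep (seq, r) (L, D) =
      if D * L ≤ r then (seq ++ List.replicate D.toNat L, r - D * L)
      else (seq ++ pvClose r L, 0) := by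
  unfold pvTierStep
  simp only [not_le.mpr hr, if_false]
  rw [PySem.Int.floordiv_eq_ediv_of_pos hL]
  by_cases hcap : D * L ≤ r
  · have hDq : D ≤ r / L := by rw [Int.le_ediv_iff_mul_le hL]; exact hcap
    have hmin : min D (r / L) = D := min_eq_left hDq
    simp only [hmin, hcap, if_true]
    simp
  · have hq : r / L < D := by
      rw [Int.ediv_lt_iff_lt_mul hL]; omega
    have hq0 : 0 ≤ r / L := Int.ediv_nonneg (by omega) (by omega)
    have hmin : min D (r / L) = r / L := min_eq_right (le_of_lt hq)
    have hrem : r - r / L * L = r % L := by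
      rw [Int.emod_def]; ring
    have hm0 : 0 ≤ r % L := Int.emod_nonneg r (by omega)
    simp only [hmin, hcap, if_false, hrem]
    unfold pvClose
    rw [PySem.Int.floordiv_eq_ediv_of_pos hL, PySem.Int.mod_eq_emod_of_pos hL]
    by_cases hz : 0 < r % L
    · rw [if_pos (⟨hz, hq⟩ : 0 < r % L ∧ r / L < D)]
      have hne : r % L ≠ 0 := by omega
      simp [hne]
    · have hz0 : r % L = 0 := by omega
      have : ¬ (0 < r % L ∧ r / L < D) := by omega
      simp [hz0]

lemma pvLoopA_congr {r r' d d' L L' : Int} (h1 : r = r') (h2 : d = d') (h3 : L = L') :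
    pvLoopA r d L = pvLoopA r' d' L' := by rw [h1, h2, h3]

lemma pvLoopA_nonpos {r : Int} (h : r ≤ 0) (d L : Int) : pvLoopA r d L = [] := by
  rw [pvLoopA, dif_neg (by omega)]

-- A's loop over one constant-limit tier (generic in the day span k)
lemma pvSeg (L : Int) (hL : 0 < L) :
    ∀ (k : Nat) (d r : Int), 0 < k → 0 < r →
      (∀ i : Nat, i + 1 < k → pvNextLimit (d + i) L = L) →
      pvLoopA r d L =
        if (k : Int) * L ≤ r
        then List.replicate k L ++ pvLoopA (r - k * L) (d + k) (pvNextLimit (d + ((k - 1 : Nat) : Int)) L)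
        else pvClose r L := by
  intro k
  induction k with
  | zero => intro d r hk; omega
  | succ n ih =>
    intro d r _ hr hswitch
    rw [pvLoopA, dif_pos (show 0 < L ∧ 0 < r from ⟨hL, hr⟩)]
    rcases lt_trichotomy r L with hlt | heq | hgt
    · -- r < L : last (partial) day
      have hcond : ¬ (((n : Int) + 1) * L ≤ r) := by nlinarith [Int.natCast_nonneg n]
      rw [min_eq_right (le_of_lt hlt), sub_self, pvLoopA_nonpos le_rfl]
      rw [if_neg (by push_cast; exact hcond)]
      rw [pvClose_small hL hr hlt]
    · -- r = L : exact fit on this day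
      rw [heq, min_self, sub_self, pvLoopA_nonpos le_rfl]
      by_cases hn : n = 0
      · subst hn
        rw [if_pos (by norm_num)]
        have : L - ((0 + 1 : Nat) : Int) * L = 0 := by push_cast; ring
        rw [this, pvLoopA_nonpos le_rfl]
        simp
      · rw [if_neg (by push_cast; nlinarith [Int.natCast_pos.mpr (Nat.pos_of_ne_zero hn)])]
        rw [pvClose_exact hL]
    · -- L < r : full day, continue
      rw [min_eq_left (le_of_lt hgt)]
      by_cases hn : n = 0
      · subst hn
        rw [if_pos (by norm_num; omega)]
        have e1 : r - L = r - ((0 + 1 : Nat) : Int) * L := by push_cast; ring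
        have e2 : d + 1 = d + ((0 + 1 : Nat) : Int) := by norm_num
        have e3 : (d : Int) = d + ((0 + 1 - 1 : Nat) : Int) := by norm_num
        rw [List.replicate_succ]
        simp only [List.replicate_zero, List.cons_append, List.nil_append]
        congr 1
        exact pvLoopA_congr e1 e2 (by rw [← e3])
      · have hn1 : 0 < n := Nat.pos_of_ne_zero hn
        have hnl : pvNextLimit d L = L := by
          have := hswitch 0 (by omega)
          simpa using this
        rw [hnl]
        rw [ih (d + 1) (r - L) hn1 (by omega)
          (by intro i hi
              have := hswitch (i + 1) (by omega)
              push_cast at this ⊢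
              convert this using 2
              ring)]
        have hiff : ((n : Int) * L ≤ r - L) ↔ (((n : Int) + 1) * L ≤ r) := by
          constructor <;> intro h <;> nlinarith
        by_cases hc : ((n : Int) + 1) * L ≤ r
        · rw [if_pos (hiff.mpr hc), if_pos (by push_cast; exact hc)]
          rw [List.replicate_succ, List.cons_append]
          congr 1
          congr 1
          exact pvLoopA_congr (by push_cast; ring) (by push_cast; ring)
            (by have e3 : d + 1 + ((n - 1 : Nat) : Int) = d + ((n + 1 - 1 : Nat) : Int) := by omega
                rw [e3])
        · rw [if_neg (fun h => hc (hiff.mp h)), if_neg (by push_cast; exact hc)]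
          rw [pvClose_step hL hgt]

-- A's unbounded final tier at limit 75 (days > 21 never change the limit)
lemma pvTail :
    ∀ (n : Nat) (r d : Int), r.toNat ≤ n → 21 < d →
      pvLoopA r d 75 = if 0 < r then pvClose r 75 else [] := by
  intro n
  induction n with
  | zero =>
    intro r d hn hd
    rw [pvLoopA_nonpos (by omega), if_neg (by omega)]
  | succ n ih =>
    intro r d hn hd
    by_cases hr : 0 < r
    · rw [pvLoopA, dif_pos (show (0 : Int) < 75 ∧ 0 < r from ⟨by norm_num, hr⟩)]
      have hnl : pvNextLimit d 75 = 75 := by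
        unfold pvNextLimit
        rw [if_neg (by omega), if_neg (by omega), if_neg (by omega)]
      rw [hnl, if_pos hr]
      rcases lt_trichotomy r 75 with hlt | heq | hgt
      · rw [min_eq_right (le_of_lt hlt), sub_self, pvLoopA_nonpos le_rfl]
        rw [pvClose_small (by norm_num) hr hlt]
      · rw [heq, min_self, sub_self, pvLoopA_nonpos le_rfl]
        rw [pvClose_exact (by norm_num)]
      · rw [min_eq_left (le_of_lt hgt), ih (r - 75) (d + 1) (by omega) (by omega)]
        rw [if_pos (by omega), pvClose_step (by norm_num) hgt]
    · rw [pvLoopA_nonpos (by omega), if_neg hr]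

-- concrete per-tier corollaries (numerals normalised)
lemma pvSeg15 (c : Int) (hc : 0 < c) :
    pvLoopA c 1 15 = if 105 ≤ c then List.replicate 7 15 ++ pvLoopA (c - 105) 8 30 else pvClose c 15 := by
  have h := pvSeg 15 (by norm_num) 7 1 c (by norm_num) hc
    (by intro i hi; unfold pvNextLimit; rw [if_neg (by omega), if_neg (by omega), if_neg (by omega)])
  norm_num [pvNextLimit] at h
  exact h

lemma pvSeg30 (c : Int) (hc : 0 < c) :
    pvLoopA c 8 30 = if 210 ≤ c then List.replicate 7 30 ++ pvLoopA (c - 210) 15 50 else pvClose c 30 := by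
  have h := pvSeg 30 (by norm_num) 7 8 c (by norm_num) hc
    (by intro i hi; unfold pvNextLimit; rw [if_neg (by omega), if_neg (by omega), if_neg (by omega)])
  norm_num [pvNextLimit] at h
  exact h

lemma pvSeg50 (c : Int) (hc : 0 < c) :
    pvLoopA c 15 50 = if 350 ≤ c then List.replicate 7 50 ++ pvLoopA (c - 350) 22 75 else pvClose c 50 := by
  have h := pvSeg 50 (by norm_num) 7 15 c (by norm_num) hc
    (by intro i hi; unfold pvNextLimit; rw [if_neg (by omega), if_neg (by omega), if_neg (by omega)])
  norm_num [pvNextLimit] at h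
  exact h

lemma pvTier15 (seq : List Int) (c : Int) (hc : 0 < c) :
    pvTierStep (seq, c) (15, 7) =
      if 105 ≤ c then (seq ++ List.replicate 7 15, c - 105) else (seq ++ pvClose c 15, 0) := by
  rw [pvTierStep_pos seq c 15 7 hc (by norm_num)]
  norm_num
  rfl

lemma pvTier30 (seq : List Int) (c : Int) (hc : 0 < c) :
    pvTierStep (seq, c) (30, 7) =
      if 210 ≤ c then (seq ++ List.replicate 7 30, c - 210) else (seq ++ pvClose c 30, 0) := by
  rw [pvTierStep_pos seq c 30 7 hc (by norm_num)]
  norm_num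
  rfl

lemma pvTier50 (seq : List Int) (c : Int) (hc : 0 < c) :
    pvTierStep (seq, c) (50, 7) =
      if 350 ≤ c then (seq ++ List.replicate 7 50, c - 350) else (seq ++ pvClose c 50, 0) := by
  rw [pvTierStep_pos seq c 50 7 hc (by norm_num)]
  norm_num
  rfl

lemma pvFinish_eq (seq : List Int) (r : Int) :
    pvFinish (seq, r) = if 0 < r then seq ++ pvClose r 75 else seq := by
  by_cases h : 0 < r
  · simp [pvFinish, pvClose, h, List.append_assoc]
  · simp [pvFinish, h]

-- ===== VERDICT (by name: the statement is the Claim_ definition above) =====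
theorem get_warmup_sequence_spec : Claim_equal_get_warmup_sequence := by
  intro c _
  unfold Spec_get_warmup_sequence get_warmup_sequence get_warmup_sequence_alt
  simp only [List.foldl]
  by_cases hc : 0 < c
  · rw [pvSeg15 c hc, pvTier15 [] c hc]
    by_cases h105 : 105 ≤ c
    · rw [if_pos h105, if_pos h105]
      by_cases hc2 : 0 < c - 105
      · rw [pvSeg30 _ hc2, pvTier30 _ _ hc2]
        by_cases h210 : 210 ≤ c - 105
        · rw [if_pos h210, if_pos h210]
          by_cases hc3 : 0 < c - 105 - 210
          · rw [pvSeg50 _ hc3, pvTier50 _ _ hc3]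
            by_cases h350 : 350 ≤ c - 105 - 210
            · rw [if_pos h350, if_pos h350]
              rw [pvTail (c - 105 - 210 - 350).toNat _ 22 le_rfl (by norm_num)]
              rw [pvFinish_eq]
              by_cases hc4 : 0 < c - 105 - 210 - 350
              · rw [if_pos hc4, if_pos hc4]
                simp
              · rw [if_neg hc4, if_neg hc4]
                simp
            · rw [if_neg h350, if_neg h350]
              rw [pvFinish_eq, if_neg (by omega)]
              simp
          · rw [pvLoopA_nonpos (by omega)]
            rw [pvTierStep_neg (show ((([] ++ List.replicate 7 15) ++ List.replicate 7 30, c - 105 - 210) : List Int × Int).2 ≤ 0 by simp; omega)]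
            rw [pvFinish_eq, if_neg (by omega)]
            simp
        · rw [if_neg h210, if_neg h210]
          rw [pvTierStep_neg (show ((([] ++ List.replicate 7 15) ++ pvClose (c - 105) 30, (0 : Int)) : List Int × Int).2 ≤ 0 by simp)]
          rw [pvFinish_eq, if_neg (by omega)]
          simp
      · rw [pvLoopA_nonpos (by omega)]
        rw [pvTierStep_neg (show (([] ++ List.replicate 7 15, c - 105) : List Int × Int).2 ≤ 0 by simp; omega)]
        rw [pvTierStep_neg (show (([] ++ List.replicate 7 15, c - 105) : List Int × Int).2 ≤ 0 by simp; omega)]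
        rw [pvFinish_eq, if_neg (by omega)]
        simp
    · rw [if_neg h105, if_neg h105]
      rw [pvTierStep_neg (show (([] ++ pvClose c 15, (0 : Int)) : List Int × Int).2 ≤ 0 by simp)]
      rw [pvTierStep_neg (show (([] ++ pvClose c 15, (0 : Int)) : List Int × Int).2 ≤ 0 by simp)]
      rw [pvFinish_eq, if_neg (by omega)]
      simp
  · rw [pvLoopA_nonpos (by omega)]
    rw [pvTierStep_neg (show ((([] : List Int), c) : List Int × Int).2 ≤ 0 by simp; omega)]
    rw [pvTierStep_neg (show ((([] : List Int), c) : List Int × Int).2 ≤ 0 by simp; omega)]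
    rw [pvTierStep_neg (show ((([] : List Int), c) : List Int × Int).2 ≤ 0 by simp; omega)]
    rw [pvFinish_eq, if_neg (by omega)]
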